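-- pv_equiv track=rewrite | github.com/abdullahsohaill/AIweb | old_reddit/llm_label_and_eval.py | safe_extract_digit
-- ===== SOURCE A (Python) =====
-- def safe_extract_digit(text):
--     if not text:
--         return None
--     # find first 0 or 1 character
--     for ch in text.strip():
--         if ch in ("0","1"):
--             return int(ch)
--     # attempt to find digit anywhere
--     for ch in text:
--         if ch in ("0","1"):
--             return int(ch)
--     return None
-- ===== SOURCE B (Python) =====
-- def safe_extract_digit(text):
--     if not text:
--         return None
--     i0 = text.find("0")
--     i1 = text.find("1")
--     if i0 == -1 and i1 == -1:
--         return None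
--     if i0 == -1:
--         return 1
--     if i1 == -1:
--         return 0
--     return 0 if i0 < i1 else 1
-- ===== Notes on version B (the rewrite author's own statement) =====
-- stated objective: faster
-- what changed: Replaces A's two streaming early-return per-character scans (over text.strip() then text) with two str.find calls computing both first-occurrence indices up front and one index comparison.
import Mathlib
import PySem

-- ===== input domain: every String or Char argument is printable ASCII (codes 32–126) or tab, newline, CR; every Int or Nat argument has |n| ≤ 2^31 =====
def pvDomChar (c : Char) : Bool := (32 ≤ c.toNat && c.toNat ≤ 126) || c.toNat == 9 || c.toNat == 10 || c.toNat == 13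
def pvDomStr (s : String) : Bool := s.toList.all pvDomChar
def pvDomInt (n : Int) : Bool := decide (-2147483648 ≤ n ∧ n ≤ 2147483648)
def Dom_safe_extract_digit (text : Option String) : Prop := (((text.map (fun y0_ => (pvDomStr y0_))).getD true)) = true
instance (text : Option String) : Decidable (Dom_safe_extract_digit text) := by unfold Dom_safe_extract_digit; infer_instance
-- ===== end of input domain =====

-- B computes both first-occurrence indices with str.find up front and compares them,
-- instead of A's two streaming early-return character scans; objective: faster (C-level str.find vs a per-character Python loop, measured).


-- ===== PORT A =====
-- the body of each of A's two identical for-loops: early return int(ch) on '0'/'1'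
def pvLoopA : List Char → Option Int
  | [] => none
  | c :: t => if c = '0' ∨ c = '1' then some (if c = '0' then 0 else 1) else pvLoopA t

def safe_extract_digit (text : Option String) : Option Int :=
  match text with
  | none => none
  | some s =>
    if s = "" then none
    else
      match pvLoopA (PySem.Str.strip s).toList with
      | some v => some v
      | none =>
        match pvLoopA s.toList with
        | some v => some v
        | none => none

-- ===== PORT B =====
def safe_extract_digit_alt (text : Option String) : Option Int :=
  match text with
  | none => none
  | some s =>
    if s = "" then none
    else
      let i0 := PySem.Str.find s "0"
      let i1 := PySem.Str.find s "1"
      if i0 = -1 ∧ i1 = -1 then none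
      else if i0 = -1 then some 1
      else if i1 = -1 then some 0
      else if i0 < i1 then some 0 else some 1

-- ===== PRECONDITION & SPEC =====
def Spec_safe_extract_digit (text : Option String) (out : Option Int) : Prop := out = safe_extract_digit_alt text
instance (text : Option String) (out : Option Int) : Decidable (Spec_safe_extract_digit text out) := by unfold Spec_safe_extract_digit; infer_instance

-- ===== CLAIM (what is proved, stated in full; the proofs are below) =====
def Claim_equal_safe_extract_digit : Prop := ∀ (text : Option String), Dom_safe_extract_digit text → Spec_safe_extract_digit text (safe_extract_digit text)

-- ===== LEMMAS AND PROOFS =====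

-- find.go on a single-char pattern is -1 or at least its counter
theorem pv_go_ge (d : Char) (cs : List Char) (k : Nat) :
    PySem.Chars.find.go [d] cs k = -1 ∨ (k : Int) ≤ PySem.Chars.find.go [d] cs k := by
  induction cs generalizing k with
  | nil => left; simp [PySem.Chars.find.go]
  | cons c t ih =>
    by_cases h : [d].isPrefixOf (c :: t)
    · right; simp [PySem.Chars.find.go, h]
    · rcases ih (k + 1) with h1 | h1
      · left; simpa [PySem.Chars.find.go, h] using h1
      · right
        have : PySem.Chars.find.go [d] (c :: t) k = PySem.Chars.find.go [d] t (k + 1) := by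
          simp [PySem.Chars.find.go, h]
      
        rw [this]; omega

def pvBdec (i0 i1 : Int) : Option Int :=
  if i0 = -1 ∧ i1 = -1 then none
  else if i0 = -1 then some 1
  else if i1 = -1 then some 0
  else if i0 < i1 then some 0 else some 1

theorem pvLoopA_eq_bdec (cs : List Char) (k : Nat) :
    pvLoopA cs = pvBdec (PySem.Chars.find.go ['0'] cs k) (PySem.Chars.find.go ['1'] cs k) := by
  induction cs generalizing k with
  | nil => simp [pvLoopA, PySem.Chars.find.go, pvBdec]
  | cons c t ih =>
    by_cases h0 : c = '0'
    · subst h0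
      have e0 : PySem.Chars.find.go ['0'] ('0' :: t) k = (k : Int) := by
        simp [PySem.Chars.find.go]
      have e1 : PySem.Chars.find.go ['1'] ('0' :: t) k = PySem.Chars.find.go ['1'] t (k + 1) := by
        simp [PySem.Chars.find.go]
      rw [e0, e1]
      rcases pv_go_ge '1' t (k + 1) with h | h
      · simp [pvLoopA, pvBdec, h]
      · have hk : ¬ ((k : Int) = -1) := by omega
        have hlt : (k : Int) < PySem.Chars.find.go ['1'] t (k + 1) := by omega
        have hne : ¬ (PySem.Chars.find.go ['1'] t (k + 1) = -1) := by omega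
        simp [pvLoopA, pvBdec, hk, hne, hlt]
    · by_cases h1 : c = '1'
      · subst h1
        have e1 : PySem.Chars.find.go ['1'] ('1' :: t) k = (k : Int) := by
          simp [PySem.Chars.find.go]
        have e0 : PySem.Chars.find.go ['0'] ('1' :: t) k = PySem.Chars.find.go ['0'] t (k + 1) := by
          simp [PySem.Chars.find.go]
        rw [e0, e1]
        rcases pv_go_ge '0' t (k + 1) with h | h
        · simp [pvLoopA, pvBdec, h]
        · have hk : ¬ ((k : Int) = -1) := by omega
          have hlt : ¬ (PySem.Chars.find.go ['0'] t (k + 1) < (k : Int)) := by omega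
          have hne : ¬ (PySem.Chars.find.go ['0'] t (k + 1) = -1) := by omega
          simp [pvLoopA, pvBdec, hk, hne, hlt]
      · have e0 : PySem.Chars.find.go ['0'] (c :: t) k = PySem.Chars.find.go ['0'] t (k + 1) := by
          simp [PySem.Chars.find.go]
          intro h; exact absurd h.symm h0
        have e1 : PySem.Chars.find.go ['1'] (c :: t) k = PySem.Chars.find.go ['1'] t (k + 1) := by
          simp [PySem.Chars.find.go]
          intro h; exact absurd h.symm h1
        rw [e0, e1, ← ih (k + 1)]
        simp [pvLoopA, h0, h1]

-- a whitespace char is not a bit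
theorem pv_space_not_bit (c : Char) (h : PySem.Chars.isspace c = true) : c ≠ '0' ∧ c ≠ '1' := by
  constructor <;> rintro rfl <;> simp [PySem.Chars.isspace] at h

theorem pvLoopA_append (xs ys : List Char) :
    pvLoopA (xs ++ ys) = match pvLoopA xs with | some v => some v | none => pvLoopA ys := by
  induction xs with
  | nil => simp [pvLoopA]
  | cons c t ih =>
    by_cases h : c = '0' ∨ c = '1'
    · simp [pvLoopA, h]
    · simp [pvLoopA, h, ih]

theorem pvLoopA_all_space (xs : List Char) (h : ∀ c ∈ xs, PySem.Chars.isspace c = true) :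
    pvLoopA xs = none := by
  induction xs with
  | nil => rfl
  | cons c t ih =>
    have hc := pv_space_not_bit c (h c (by simp))
    have : ¬ (c = '0' ∨ c = '1') := by tauto
    simp [pvLoopA, this]
    exact ih (fun c hc => h c (by simp [hc]))

theorem pvLoopA_lstrip (cs : List Char) : pvLoopA (PySem.Chars.lstrip cs) = pvLoopA cs := by
  induction cs with
  | nil => rfl
  | cons c t ih =>
    by_cases h : PySem.Chars.isspace c = true
    · have hc := pv_space_not_bit c h
      have hnb : ¬ (c = '0' ∨ c = '1') := by tauto
      simp [PySem.Chars.lstrip, List.dropWhile, h, pvLoopA, hnb] at *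
      exact ih
    · simp [PySem.Chars.lstrip, List.dropWhile, h]

theorem pvLoopA_rstrip (cs : List Char) : pvLoopA (PySem.Chars.rstrip cs) = pvLoopA cs := by
  have hsplit : cs = PySem.Chars.rstrip cs ++ (List.takeWhile PySem.Chars.isspace cs.reverse).reverse := by
    have := List.takeWhile_append_dropWhile (p := PySem.Chars.isspace) (l := cs.reverse)
    calc cs = cs.reverse.reverse := by simp
    _ = _ := by
      have h2 := congrArg List.reverse this
      simp only [List.reverse_append, List.reverse_reverse] at h2
      rw [PySem.Chars.rstrip, List.reverse_reverse]
      exact h2.symm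
  conv_rhs => rw [hsplit]
  rw [pvLoopA_append]
  have hsp : pvLoopA (List.takeWhile PySem.Chars.isspace cs.reverse).reverse = none := by
    apply pvLoopA_all_space
    intro c hc
    rw [List.mem_reverse] at hc
    exact List.mem_takeWhile_imp hc
  rw [hsp]
  cases pvLoopA (PySem.Chars.rstrip cs) <;> rfl

theorem pvLoopA_strip (cs : List Char) : pvLoopA (PySem.Chars.strip cs) = pvLoopA cs := by
  rw [PySem.Chars.strip, pvLoopA_rstrip, pvLoopA_lstrip]

-- ===== VERDICT (by name: the statement is the Claim_ definition above) =====
theorem safe_extract_digit_spec : Claim_equal_safe_extract_digit := by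
  intro text _
  unfold Spec_safe_extract_digit safe_extract_digit safe_extract_digit_alt
  match text with
  | none => rfl
  | some s =>
    by_cases hs : s = ""
    · simp [hs]
    · simp only [hs, if_false]
      have hstrip : (PySem.Str.strip s).toList = PySem.Chars.strip s.toList := by
        simp [PySem.Str.strip]
      rw [hstrip, pvLoopA_strip]
      have hfind0 : PySem.Str.find s "0" = PySem.Chars.find s.toList ['0'] := by
        simp [PySem.Str.find]
      have hfind1 : PySem.Str.find s "1" = PySem.Chars.find s.toList ['1'] := by
        simp [PySem.Str.find]
      rw [pvLoopA_eq_bdec s.toList 0]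
      simp only [hfind0, hfind1, PySem.Chars.find, pvBdec]
      split_ifs <;> rfl
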